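/- GENERATED by farm/mkstatement.py from design/units.tsv (unit `DGifGetScreenDesc.6`) and the assertions of Gif/Spec/Seg_DGifGetScreenDesc.lean — do not edit.
   THE STATEMENT of the proof unit `DGifGetScreenDesc.6`: segment 6 of `DGifGetScreenDesc` (34 instructions; entries 0x108284;
   exits 0x108253; ranges 0x108284-0x108315)
   takes each of its entry assertions to one of its exit assertions (`Gif.Spec.DGifGetScreenDesc.Seg6`), given the contracts of its callees.
   What the names mean: ProgX/Base/Spec/Basic.lean (the shared hypotheses), Gif/Spec/Seg_DGifGetScreenDesc.lean (the assertions). The theorem to prove: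
   `theorem DGifGetScreenDesc_6_ok : Gif.Spec.DGifGetScreenDesc_6.Statement`. -/
import Gif.Code
import Gif.Dec.All
import Gif.Labels
import Gif.Spec.Seg_DGifGetScreenDesc
namespace Gif.Spec.DGifGetScreenDesc_6
open X86 X86.User Asan

/-- The statement of unit `DGifGetScreenDesc.6`. -/
def Statement : Prop :=
  ∀ (Lay : Layout) (_hLay : Lay.hi = 0x1000000) (μ : Microarch) (_hμ : UserX.MicroOK μ) (u₀ : State)
    (_hcode : HasCodeNat Lay u₀ Gif.L.DGifGetScreenDesc.entry Gif.Code.code_DGifGetScreenDesc.nat Gif.L.DGifGetScreenDesc.size)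
    (_h_asan_load8_noabort : Asan.SmallCheck Lay μ ProgX.Base.WayInv (ProgX.Base.CodeOK u₀) [.rax, .rcx, .rdx] 8 ProgX.Base.L.__asan_load8_noabort.entry)
    (_h_asan_store1_noabort : Asan.SmallCheck Lay μ ProgX.Base.WayInv (ProgX.Base.CodeOK u₀) [.rax, .rdx] 1 ProgX.Base.L.__asan_store1_noabort.entry),
    Gif.Spec.DGifGetScreenDesc.Seg6 Lay μ u₀

end Gif.Spec.DGifGetScreenDesc_6
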